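-- pv_equiv track=rewrite | github.com/raluvy95/pymuc | src/main.py | count_used
-- ===== SOURCE A (Python) =====
-- def count_used(cmds: list[str]):
--     used: list[dict[str, int]] = []
--     for command in cmds:
--         exists = False
--         for exist in used:
--             if command in exist:
--                 exist[command] += 1
--                 exists = True
--         if not exists:
--             used.append({command: 1})
--     return used
-- ===== SOURCE B (Python) =====
-- def count_used(cmds: list[str]):
--     order: list[str] = []
--     for c in cmds:
--         if c not in order:
--             order.append(c)
--     return [{c: cmds.count(c)} for c in order]
-- ===== Notes on version B (the rewrite author's own statement) =====
-- stated objective: simpler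
-- what changed: Replaces A's single interleaved loop that scans and mutates a list of counter dicts with two separate plain passes: first build the first-seen-order list of distinct commands, then emit [{c: cmds.count(c)} for c in order].
import Mathlib
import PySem

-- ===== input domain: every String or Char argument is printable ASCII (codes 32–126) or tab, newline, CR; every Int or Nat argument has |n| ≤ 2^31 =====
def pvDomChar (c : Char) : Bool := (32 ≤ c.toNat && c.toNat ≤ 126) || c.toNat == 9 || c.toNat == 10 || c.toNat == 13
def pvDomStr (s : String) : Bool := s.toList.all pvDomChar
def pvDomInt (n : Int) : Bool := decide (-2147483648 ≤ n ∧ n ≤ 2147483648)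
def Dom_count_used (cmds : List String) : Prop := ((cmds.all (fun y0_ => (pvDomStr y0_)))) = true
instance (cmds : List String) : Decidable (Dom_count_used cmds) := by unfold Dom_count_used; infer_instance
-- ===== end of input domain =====

-- B replaces A's single interleaved scan-and-mutate loop over counter dicts by two plain
-- passes (build the first-seen order of distinct commands, then recount each with list.count);
-- same cost, simpler code.


-- ===== PORT A =====
-- `exist[command] += 1`: update the entry with that key in place; exact, since Python dict
-- keys are unique and the update keeps insertion order.
def pvIncr (exist : List (String × Int)) (command : String) : List (String × Int) :=
  exist.map (fun p => if p.1 == command then (p.1, p.2 + 1) else p)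

-- body of A's outer `for command in cmds` loop: the inner `for exist in used` scan with the
-- `exists` flag, then the conditional append
def pvStepA (used : List (List (String × Int))) (command : String) : List (List (String × Int)) :=
  let r := used.foldl
    (fun (acc : List (List (String × Int)) × Bool) exist =>
      if exist.any (fun p => p.1 == command) then (acc.1 ++ [pvIncr exist command], true)
      else (acc.1 ++ [exist], acc.2)) ([], false)
  if r.2 then r.1 else r.1 ++ [[(command, (1 : Int))]]

def count_used (cmds : List String) : List (List (String × Int)) :=
  cmds.foldl pvStepA []

-- ===== PORT B =====
-- first pass of B: first-seen-order list of distinct commands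
def pvOrder (cmds : List String) : List String :=
  cmds.foldl (fun acc c => if acc.contains c then acc else acc ++ [c]) []

def count_used_alt (cmds : List String) : List (List (String × Int)) :=
  (pvOrder cmds).map (fun c => [(c, (PySem.List.count cmds c : Int))])

-- ===== PRECONDITION & SPEC =====
def Spec_count_used (cmds : List String) (out : List (List (String × Int))) : Prop := out = count_used_alt cmds
instance (cmds : List String) (out : List (List (String × Int))) : Decidable (Spec_count_used cmds out) := by unfold Spec_count_used; infer_instance

-- ===== CLAIM (what is proved, stated in full; the proofs are below) =====
def Claim_equal_count_used : Prop := ∀ (cmds : List String), Dom_count_used cmds → Spec_count_used cmds (count_used cmds)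

-- ===== LEMMAS AND PROOFS =====

-- A's inner scan, as a map over `used` plus the OR of the membership tests
theorem pvInner_eq (command : String) (used : List (List (String × Int)))
    (acc : List (List (String × Int))) (e : Bool) :
    used.foldl
      (fun (acc : List (List (String × Int)) × Bool) exist =>
        if exist.any (fun p => p.1 == command) then (acc.1 ++ [pvIncr exist command], true)
        else (acc.1 ++ [exist], acc.2)) (acc, e)
    = (acc ++ used.map (fun d => if d.any (fun p => p.1 == command) then pvIncr d command else d),
       e || used.any (fun d => d.any (fun p => p.1 == command))) := by
  induction used generalizing acc e with
  | nil => simp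
  | cons d rest ih =>
    by_cases h : d.any (fun p => p.1 == command)
    · simp [h, ih]
    · simp [h, ih]

-- A's outer step on a state of B's shape (each dict is a singleton {x: f x})
theorem pvStepA_map (o : List String) (f : String → Int) (c : String) :
    pvStepA (o.map (fun x => [(x, f x)])) c
    = if c ∈ o then o.map (fun x => [(x, if x = c then f x + 1 else f x)])
      else o.map (fun x => [(x, f x)]) ++ [[(c, (1 : Int))]] := by
  unfold pvStepA
  rw [pvInner_eq]
  by_cases hc : c ∈ o
  · have hany : (o.map (fun x => [(x, f x)])).any
        (fun d => d.any (fun p => p.1 == c)) = true := by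
      simp only [List.any_map, List.any_eq_true]
      exact ⟨c, hc, by simp⟩
    simp only [hany, Bool.false_or, if_true, hc, List.nil_append, List.map_map]
    refine List.map_congr_left (fun x _ => ?_)
    by_cases hx : x = c <;> simp [pvIncr, hx]
  · have hany : (o.map (fun x => [(x, f x)])).any
        (fun d => d.any (fun p => p.1 == c)) = false := by
      simp only [List.any_map, List.any_eq_false]
      intro x hx
      simp only [Function.comp, List.any_cons, List.any_nil, Bool.or_false]
      exact fun h => hc ((eq_of_beq h) ▸ hx)
    simp only [hany, Bool.false_or, Bool.false_eq_true, if_false, hc,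
      List.nil_append, List.map_map]
    congr 1
    refine List.map_congr_left (fun x hx => ?_)
    have hne : ¬ (x = c) := fun h => hc (h ▸ hx)
    simp [pvIncr, hne]

-- loop invariant: running A's loop over `rest` from a state of B's shape yields B's shape,
-- with first-seen order extended by `rest` and counts incremented by occurrences in `rest`
theorem pvLoop (rest : List String) : ∀ (o : List String) (f : String → Int),
    rest.foldl pvStepA (o.map (fun x => [(x, f x)]))
    = (rest.foldl (fun acc c => if acc.contains c then acc else acc ++ [c]) o).map
        (fun x => [(x, (if x ∈ o then f x else 0) + (List.count x rest : Int))]) := by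
  induction rest with
  | nil =>
    intro o f
    simp only [List.foldl_nil, List.count_nil]
    refine (List.map_congr_left (fun x hx => by simp [hx])).symm
  | cons c rs ih =>
    intro o f
    simp only [List.foldl_cons]
    rw [pvStepA_map]
    by_cases hc : c ∈ o
    · rw [if_pos hc, ih o (fun x => if x = c then f x + 1 else f x)]
      have ho : o.contains c = true := by simpa using hc
      simp only [ho, if_true]
      refine List.map_congr_left (fun x _ => ?_)
      by_cases hx : x = c
      · subst hx; simp only [hc, if_true, List.count_cons_self]
        congr 2; push_cast; ring
      · have hcnt : List.count x (c :: rs) = List.count x rs := by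
          simp only [List.count_cons, beq_iff_eq, Nat.add_eq_left, ite_eq_right_iff,
            one_ne_zero, imp_false]
          exact fun h => hx h.symm
        simp [hx, hcnt]
    · rw [if_neg hc]
      have heq : o.map (fun x => [(x, f x)]) ++ [[(c, (1 : Int))]]
          = (o ++ [c]).map (fun x => [(x, if x = c then 1 else f x)]) := by
        rw [List.map_append]
        congr 1
        · refine (List.map_congr_left (fun x hx => ?_)).symm
          have hne : ¬ (x = c) := fun h => hc (h ▸ hx)
          simp [hne]
        · simp
      rw [heq, ih (o ++ [c]) (fun x => if x = c then 1 else f x)]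
      have ho : o.contains c = false := by simpa using hc
      simp only [ho, Bool.false_eq_true, if_false]
      refine List.map_congr_left (fun x _ => ?_)
      by_cases hx : x = c
      · subst hx
        simp only [List.mem_append, List.mem_singleton, or_true, if_true, hc,
          if_false, List.count_cons_self]
        congr 2; push_cast; ring
      · have hmem : (x ∈ o ++ [c]) ↔ x ∈ o := by simp [hx]
        have hcnt : List.count x (c :: rs) = List.count x rs := by
          simp only [List.count_cons, beq_iff_eq, Nat.add_eq_left, ite_eq_right_iff,
            one_ne_zero, imp_false]
          exact fun h => hx h.symm
        simp only [hmem, hx, if_false, hcnt]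

-- ===== VERDICT (by name: the statement is the Claim_ definition above) =====
theorem count_used_spec : Claim_equal_count_used := by
  intro cmds _
  show count_used cmds = count_used_alt cmds
  unfold count_used count_used_alt pvOrder
  have := pvLoop cmds [] (fun _ => 0)
  simp only [List.map_nil] at this
  rw [this]
  refine List.map_congr_left (fun x _ => ?_)
  simp [PySem.List.count_eq]
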